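-- pv_equiv track=rewrite | github.com/knigth95/ysyx_self-learn | .history/t1_20240331205757.py | countGoodNodes
-- ===== SOURCE A (Python) =====
-- from typing import List
-- from collections import defaultdict
--
-- def countGoodNodes(n: int, m: int, redEdges: List[List[int]], whiteEdges: List[List[int]]) -> int:
--     g = [defaultdict(int) for _ in range(n)]
--     for u, v in redEdges:
--         g[u][v] = g[v][u] = 1
--     for u, v in whiteEdges:
--         g[u][v] = g[v][u] = 0
--     cnt = [0] * n
--     for u in range(n):
--         for v in g[u]:
--             cnt[u] += g[u][v]
--     return sum(cnt[u] == len(g[u]) for u in range(n))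
-- ===== SOURCE B (Python) =====
-- def countGoodNodes(n, m, redEdges, whiteEdges):
--     good = [True] * n
--     for u, v in whiteEdges:
--         good[u] = good[v] = False
--     return sum(good)
-- ===== Notes on version B (the rewrite author's own statement) =====
-- stated objective: simpler
-- what changed: Instead of building a per-node adjacency dict over red and white edges and then counting per-node edge values against the node degree, B observes that a node is good iff it touches no white edge (white assignments overwrite red ones), so it just marks the endpoints of white edges in one boolean array and sums it; redEdges are never read.
import Mathlib
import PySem

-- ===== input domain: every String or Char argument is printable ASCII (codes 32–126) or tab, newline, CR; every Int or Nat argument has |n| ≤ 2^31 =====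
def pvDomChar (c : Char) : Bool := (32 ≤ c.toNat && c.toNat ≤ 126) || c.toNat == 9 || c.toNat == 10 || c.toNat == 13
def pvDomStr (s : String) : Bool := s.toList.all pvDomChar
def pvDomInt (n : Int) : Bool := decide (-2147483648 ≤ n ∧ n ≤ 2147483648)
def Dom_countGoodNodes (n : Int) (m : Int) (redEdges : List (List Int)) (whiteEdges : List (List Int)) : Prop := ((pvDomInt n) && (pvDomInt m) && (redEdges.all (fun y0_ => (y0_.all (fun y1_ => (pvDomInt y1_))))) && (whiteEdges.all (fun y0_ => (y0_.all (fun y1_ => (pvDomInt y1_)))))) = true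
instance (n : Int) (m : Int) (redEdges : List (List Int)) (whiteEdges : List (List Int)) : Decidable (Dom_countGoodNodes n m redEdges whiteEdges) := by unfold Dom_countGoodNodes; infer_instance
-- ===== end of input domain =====

-- B replaces A's per-node adjacency dicts by one boolean array marking white-edge endpoints
-- (a node is good iff no white edge touches it, since white assignments overwrite red ones).

-- ===== PORT A =====
-- g[i][k] = val  (Python list indexing on g, dict assignment inside)
def pvAssign (g : List (PySem.Dict Int Int)) (i : Int) (k : Int) (val : Int) : List (PySem.Dict Int Int) :=
  PySem.List.pySetD g i ((PySem.List.pyGetD g i PySem.Dict.empty).insert k val)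

-- body of 'for u, v in edges: g[u][v] = g[v][u] = val'; an edge not of length 2 raises
-- ValueError in Python (excluded by Pre_), the port leaves g unchanged there
def pvStep (val : Int) (g : List (PySem.Dict Int Int)) (e : List Int) : List (PySem.Dict Int Int) :=
  match e with
  | [u, v] => pvAssign (pvAssign g u v val) v u val
  | _ => g

-- g after both edge loops
def pvG2 (n : Int) (redEdges whiteEdges : List (List Int)) : List (PySem.Dict Int Int) :=
  whiteEdges.foldl (pvStep 0)
    (redEdges.foldl (pvStep 1)
      ((PySem.List.pyRange 0 n 1).map (fun _ => (PySem.Dict.empty : PySem.Dict Int Int))))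

-- cnt[u] = sum over the keys v of g[u] of g[u][v]  (the loop 'for u in range(n)' walks g itself)
def pvCnt (g2 : List (PySem.Dict Int Int)) : List Int :=
  g2.map (fun d => d.keys.foldl (fun c v => c + d.getD v 0) 0)

-- sum(cnt[u] == len(g[u]) for u in range(n)): u walks cnt and g in parallel
def countGoodNodes (n : Int) (m : Int) (redEdges : List (List Int)) (whiteEdges : List (List Int)) : Int :=
  let g2 := pvG2 n redEdges whiteEdges
  let cnt := pvCnt g2
  (cnt.zip g2).foldl (fun s p => s + (if p.1 = (p.2.size : Int) then 1 else 0)) 0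

-- ===== PORT B =====
-- body of 'for u, v in whiteEdges: good[u] = good[v] = False' (malformed edges raise in
-- Python, excluded by Pre_; the port leaves good unchanged there)
def pvBStep (g : List Bool) (e : List Int) : List Bool :=
  match e with
  | [u, v] => PySem.List.pySetD (PySem.List.pySetD g u false) v false
  | _ => g

def countGoodNodes_alt (n : Int) (m : Int) (redEdges : List (List Int)) (whiteEdges : List (List Int)) : Int :=
  let good := whiteEdges.foldl pvBStep (List.replicate n.toNat true)
  good.foldl (fun s b => s + (if b then 1 else 0)) 0

-- ===== PRECONDITION & SPEC =====
-- Pre_ is exactly A's non-raising domain: every edge has length 2 (otherwise A raises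
-- ValueError on unpacking) and endpoints in [-n, n) (otherwise A raises IndexError).
def Pre_countGoodNodes (n : Int) (m : Int) (redEdges : List (List Int)) (whiteEdges : List (List Int)) : Prop :=
  (∀ e ∈ redEdges, e.length = 2 ∧ ∀ x ∈ e, -n ≤ x ∧ x < n) ∧
  (∀ e ∈ whiteEdges, e.length = 2 ∧ ∀ x ∈ e, -n ≤ x ∧ x < n)
instance (n : Int) (m : Int) (redEdges : List (List Int)) (whiteEdges : List (List Int)) : Decidable (Pre_countGoodNodes n m redEdges whiteEdges) := by unfold Pre_countGoodNodes; infer_instance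

def pvWitness_countGoodNodes : Int × Int × List (List Int) × List (List Int) :=
  (4, 3, [[0, 1], [1, 2]], [[2, 3]])

def Spec_countGoodNodes (n : Int) (m : Int) (redEdges : List (List Int)) (whiteEdges : List (List Int)) (out : Int) : Prop := out = countGoodNodes_alt n m redEdges whiteEdges
instance (n : Int) (m : Int) (redEdges : List (List Int)) (whiteEdges : List (List Int)) (out : Int) : Decidable (Spec_countGoodNodes n m redEdges whiteEdges out) := by unfold Spec_countGoodNodes; infer_instance

-- ===== CLAIM (what is proved, stated in full; the proofs are below) =====
def Claim_equal_countGoodNodes : Prop := ∀ (n : Int) (m : Int) (redEdges : List (List Int)) (whiteEdges : List (List Int)), Dom_countGoodNodes n m redEdges whiteEdges → Pre_countGoodNodes n m redEdges whiteEdges → Spec_countGoodNodes n m redEdges whiteEdges (countGoodNodes n m redEdges whiteEdges)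

-- ===== LEMMAS AND PROOFS =====

-- the position a Python index i addresses in a list of length len
def pvWrapIdx (len : Nat) (x : Int) : Nat :=
  if 0 ≤ x then x.toNat else (x + len).toNat

-- node j is hit by some white edge endpoint (after Python index wraparound)
def pvTouchedIdx (es : List (List Int)) (len : Nat) (j : Nat) : Prop :=
  ∃ e ∈ es, ∃ x ∈ e, pvWrapIdx len x = j

-- Bool form
def pvTouchedIdxB (es : List (List Int)) (len : Nat) (j : Nat) : Bool :=
  es.any (fun e => e.any (fun x => pvWrapIdx len x == j))

theorem pvTouchedIdxB_iff (es : List (List Int)) (len : Nat) (j : Nat) :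
    pvTouchedIdxB es len j = true ↔ pvTouchedIdx es len j := by
  simp [pvTouchedIdxB, pvTouchedIdx, List.any_eq_true]

theorem pvWrapIdx_lt (len : Nat) (x : Int) (h1 : -(len : Int) ≤ x) (h2 : x < (len : Int)) :
    pvWrapIdx len x < len := by
  unfold pvWrapIdx
  split_ifs <;> omega

theorem zip_map_self {α β : Type} (f : α → β) (l : List α) :
    (l.map f).zip l = l.map (fun a => (f a, a)) := by
  calc (l.map f).zip l = (l.map f).zip (l.map id) := by rw [List.map_id]
    _ = l.map (fun a => (f a, id a)) := List.zip_map'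
    _ = l.map (fun a => (f a, a)) := rfl

theorem pvGetD_eq (d : PySem.Dict Int Int) (k v : Int) : d.getD k v = (d.get? k).getD v := by
  simp [PySem.Dict.getD, PySem.Dict.get?]

theorem pvAssign_length (g : List (PySem.Dict Int Int)) (i k val : Int) :
    (pvAssign g i k val).length = g.length := by
  unfold pvAssign; exact PySem.List.length_pySetD _ _ _

theorem pvStep_length (val : Int) (g : List (PySem.Dict Int Int)) (e : List Int) :
    (pvStep val g e).length = g.length := by
  unfold pvStep
  match e with
  | [] => rfl
  | [_] => rfl
  | [u, v] => simp [pvAssign_length]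
  | _ :: _ :: _ :: _ => rfl

theorem foldl_pvStep_length (val : Int) (es : List (List Int)) (g : List (PySem.Dict Int Int)) :
    (es.foldl (pvStep val) g).length = g.length := by
  induction es generalizing g with
  | nil => rfl
  | cons e es ih => simp [List.foldl_cons, ih, pvStep_length]

theorem pyIdx?_inrange (len : Nat) (i : Int) (h1 : -(len : Int) ≤ i) (h2 : i < (len : Int)) :
    PySem.List.pyIdx? len i = some (pvWrapIdx len i) := by
  unfold PySem.List.pyIdx? pvWrapIdx
  by_cases hx : 0 ≤ i
  · rw [if_pos hx, if_pos hx, if_pos h2]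
  · rw [if_neg hx, if_neg hx, if_pos h1]
    congr 1
    omega

theorem pyGetD_inrange {α : Type} (xs : List α) (i : Int) (d : α)
    (h1 : -(xs.length : Int) ≤ i) (h2 : i < (xs.length : Int)) :
    PySem.List.pyGetD xs i d = xs.getD (pvWrapIdx xs.length i) d := by
  have hw : pvWrapIdx xs.length i < xs.length := pvWrapIdx_lt _ _ h1 h2
  simp only [PySem.List.pyGetD, PySem.List.pyGet?, pyIdx?_inrange xs.length i h1 h2,
    Option.bind_some]
  rw [List.getElem?_eq_getElem hw, List.getD_eq_getElem _ _ hw]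
  rfl

theorem pySetD_inrange {α : Type} (xs : List α) (i : Int) (v : α)
    (h1 : -(xs.length : Int) ≤ i) (h2 : i < (xs.length : Int)) :
    PySem.List.pySetD xs i v = xs.set (pvWrapIdx xs.length i) v := by
  simp only [PySem.List.pySetD, PySem.List.pySet?, pyIdx?_inrange xs.length i h1 h2,
    Option.map_some, Option.getD_some]

theorem pvAssign_of_inrange (g : List (PySem.Dict Int Int)) (i k val : Int)
    (h1 : -(g.length : Int) ≤ i) (h2 : i < (g.length : Int)) :
    pvAssign g i k val
      = g.set (pvWrapIdx g.length i) ((g.getD (pvWrapIdx g.length i) PySem.Dict.empty).insert k val) := by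
  unfold pvAssign
  rw [pySetD_inrange _ _ _ h1 h2, pyGetD_inrange _ _ _ h1 h2]

theorem mem_pvAssign (g : List (PySem.Dict Int Int)) (i k val : Int) (d : PySem.Dict Int Int)
    (hd : d ∈ pvAssign g i k val) :
    d ∈ g ∨ ∃ d' ∈ g, d = d'.insert k val := by
  unfold pvAssign PySem.List.pySetD at hd
  rcases h : PySem.List.pySet? g i ((PySem.List.pyGetD g i PySem.Dict.empty).insert k val)
    with _ | r
  · rw [h] at hd; exact Or.inl hd
  · rw [h] at hd
    simp only [Option.getD_some] at hd
    have hin : PySem.Raise.InRange g.length i := by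
      by_contra hc
      rw [(PySem.List.pySet?_eq_none_iff _ _ _).mpr hc] at h; simp at h
    unfold PySem.List.pySet? at h
    rcases hj : PySem.List.pyIdx? g.length i with _ | j
    · rw [hj] at h; simp at h
    · rw [hj] at h
      simp only [Option.map_some, Option.some.injEq] at h
      subst h
      rcases List.mem_or_eq_of_mem_set hd with hmem | heq
      · exact Or.inl hmem
      · exact Or.inr ⟨_, PySem.List.pyGetD_mem g _ hin, heq⟩

theorem insert_values {Q : Int → Prop} (d : PySem.Dict Int Int) (k val : Int)
    (hd : ∀ v x, d.get? v = some x → Q x) (hv : Q val) :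
    ∀ v x, (d.insert k val).get? v = some x → Q x := by
  intro v x h
  rw [PySem.Dict.get?_insert] at h
  split_ifs at h with hc
  · cases h; exact hv
  · exact hd v x h

theorem pvAssign_values {Q : Int → Prop} (g : List (PySem.Dict Int Int)) (i k val : Int)
    (hg : ∀ d ∈ g, ∀ v x, d.get? v = some x → Q x) (hv : Q val) :
    ∀ d ∈ pvAssign g i k val, ∀ v x, d.get? v = some x → Q x := by
  intro d hd
  rcases mem_pvAssign g i k val d hd with hmem | ⟨d', hd', rfl⟩
  · exact hg d hmem
  · exact insert_values d' k val (hg d' hd') hv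

theorem foldl_pvStep_values {Q : Int → Prop} (val : Int) (es : List (List Int))
    (g : List (PySem.Dict Int Int))
    (hg : ∀ d ∈ g, ∀ v x, d.get? v = some x → Q x) (hv : Q val) :
    ∀ d ∈ es.foldl (pvStep val) g, ∀ v x, d.get? v = some x → Q x := by
  induction es generalizing g with
  | nil => exact hg
  | cons e es ih =>
    refine ih _ ?_
    unfold pvStep
    match e with
    | [] => exact hg
    | [_] => exact hg
    | [u, v] => exact pvAssign_values _ v u val (pvAssign_values _ u v val hg hv) hv
    | _ :: _ :: _ :: _ => exact hg

-- "some stored value is 0" at position j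
def pvHas0 (g : List (PySem.Dict Int Int)) (j : Nat) : Prop :=
  ∃ w, (g.getD j PySem.Dict.empty).get? w = some (0 : Int)

theorem pvHas0_insert0 (d : PySem.Dict Int Int) (k : Int) :
    ∃ w, (d.insert k (0 : Int)).get? w = some 0 :=
  ⟨k, by rw [PySem.Dict.get?_insert]; simp⟩

theorem pvHas0_step (g : List (PySem.Dict Int Int)) (u v : Int)
    (hu1 : -(g.length : Int) ≤ u) (hu2 : u < (g.length : Int))
    (hv1 : -(g.length : Int) ≤ v) (hv2 : v < (g.length : Int))
    (j : Nat) (hj : j < g.length) :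
    pvHas0 (pvStep 0 g [u, v]) j ↔
      pvHas0 g j ∨ j = pvWrapIdx g.length u ∨ j = pvWrapIdx g.length v := by
  have hul : pvWrapIdx g.length u < g.length := pvWrapIdx_lt _ _ hu1 hu2
  have hvl : pvWrapIdx g.length v < g.length := pvWrapIdx_lt _ _ hv1 hv2
  have hstep : pvStep 0 g [u, v] =
      (g.set (pvWrapIdx g.length u) ((g.getD (pvWrapIdx g.length u) PySem.Dict.empty).insert v 0)).set
        (pvWrapIdx g.length v)
        (((g.set (pvWrapIdx g.length u)
            ((g.getD (pvWrapIdx g.length u) PySem.Dict.empty).insert v 0)).getD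
              (pvWrapIdx g.length v) PySem.Dict.empty).insert u 0) := by
    show pvAssign (pvAssign g u v 0) v u 0 = _
    rw [pvAssign_of_inrange g u v 0 hu1 hu2,
        pvAssign_of_inrange _ v u 0 (by rw [List.length_set]; exact hv1)
          (by rw [List.length_set]; exact hv2)]
    simp only [List.length_set]
  rw [hstep]
  unfold pvHas0
  by_cases hjv : j = pvWrapIdx g.length v
  · subst hjv
    rw [List.getD_eq_getElem _ _ (by simpa using hj), List.getElem_set_self]
    exact ⟨fun _ => Or.inr (Or.inr rfl), fun _ => pvHas0_insert0 _ _⟩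
  · rw [List.getD_eq_getElem _ _ (by simpa using hj),
        List.getElem_set_ne (fun h => hjv h.symm) (by simpa using hj)]
    by_cases hju : j = pvWrapIdx g.length u
    · subst hju
      rw [List.getElem_set_self]
      exact ⟨fun _ => Or.inr (Or.inl rfl), fun _ => pvHas0_insert0 _ _⟩
    · rw [List.getElem_set_ne (fun h => hju h.symm) (by simpa using hj),
          ← List.getD_eq_getElem _ _ hj]
      constructor
      · exact Or.inl
      · rintro (h | h | h)
        · exact h
        · exact absurd h hju
        · exact absurd h hjv

theorem pvHas0_fold (es : List (List Int)) (g : List (PySem.Dict Int Int))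
    (hes : ∀ e ∈ es, e.length = 2 ∧ ∀ x ∈ e, -(g.length : Int) ≤ x ∧ x < (g.length : Int))
    (j : Nat) (hj : j < g.length) :
    pvHas0 (es.foldl (pvStep 0) g) j ↔ pvHas0 g j ∨ pvTouchedIdx es g.length j := by
  induction es generalizing g with
  | nil => simp [pvTouchedIdx]
  | cons e es ih =>
    obtain ⟨he2, hebound⟩ := hes e (by simp)
    match e, he2 with
    | [u, v], _ =>
      have hu := hebound u (by simp)
      have hv := hebound v (by simp)
      have hlen : (pvStep 0 g [u, v]).length = g.length := pvStep_length _ _ _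
      rw [List.foldl_cons,
          ih (pvStep 0 g [u, v])
            (fun e' he' => by rw [hlen]; exact hes e' (List.mem_cons_of_mem _ he'))
            (by rw [hlen]; exact hj),
          hlen,
          pvHas0_step g u v hu.1 hu.2 hv.1 hv.2 j hj]
      unfold pvTouchedIdx
      constructor
      · rintro ((h | h | h) | ⟨e', he', x, hx, hw⟩)
        · exact Or.inl h
        · exact Or.inr ⟨[u, v], by simp, u, by simp, h.symm⟩
        · exact Or.inr ⟨[u, v], by simp, v, by simp, h.symm⟩
        · exact Or.inr ⟨e', List.mem_cons_of_mem _ he', x, hx, hw⟩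
      · rintro (h | ⟨e', he', x, hx, hw⟩)
        · exact Or.inl (Or.inl h)
        · rcases List.mem_cons.mp he' with rfl | he''
          · rcases List.mem_cons.mp hx with rfl | hx'
            · exact Or.inl (Or.inr (Or.inl hw.symm))
            · simp only [List.mem_cons, List.not_mem_nil, or_false] at hx'
              subst hx'
              exact Or.inl (Or.inr (Or.inr hw.symm))
          · exact Or.inr ⟨e', he'', x, hx, hw⟩

-- a 0/1-valued sum over a list equals its length iff every summand is 1
theorem sum01_eq_length_iff (f : Int → Int) (l : List Int)
    (h : ∀ x ∈ l, f x = 0 ∨ f x = 1) :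
    ((l.map f).sum = (l.length : Int)) ↔ ∀ x ∈ l, f x = 1 := by
  induction l with
  | nil => simp
  | cons a l ih =>
    have ha := h a (by simp)
    have hl : ∀ x ∈ l, f x = 0 ∨ f x = 1 := fun x hx => h x (List.mem_cons_of_mem _ hx)
    have hsum : (l.map f).sum ≤ (l.length : Int) := by
      clear ih ha h
      induction l with
      | nil => simp
      | cons b l ih2 =>
        have hb := hl b (by simp)
        have hl' : ∀ x ∈ l, f x = 0 ∨ f x = 1 := fun x hx => hl x (List.mem_cons_of_mem _ hx)
        have := ih2 hl'
        simp only [List.map_cons, List.sum_cons, List.length_cons]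
        push_cast
        omega
    specialize ih hl
    simp only [List.map_cons, List.sum_cons, List.length_cons, List.mem_cons]
    constructor
    · intro hEq
      have hfa : f a = 1 := by
        rcases ha with h0 | h1
        · exfalso; rw [h0] at hEq; push_cast at hEq; omega
        · exact h1
      have hrest : (l.map f).sum = (l.length : Int) := by
        rw [hfa] at hEq; push_cast at hEq ⊢; omega
      exact fun x hx => hx.elim (fun hxa => hxa ▸ hfa) (ih.mp hrest x)
    · intro hall
      have hfa : f a = 1 := hall a (Or.inl rfl)
      have : ∀ x ∈ l, f x = 1 := fun x hx => hall x (Or.inr hx)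
      rw [hfa, ih.mpr this]; push_cast; ring

-- countP over a list equals countP over its index range, given a pointwise bridge
theorem countP_index {α : Type} (l : List α) (p : α → Bool) (q : Nat → Bool)
    (h : ∀ j (hj : j < l.length), p l[j] = q j) :
    l.countP p = (List.range l.length).countP q := by
  induction l generalizing q with
  | nil => simp
  | cons a l ih =>
    have h0 : p a = q 0 := h 0 (by simp)
    have hsh : ∀ j (hj : j < l.length), p l[j] = q (j + 1) := by
      intro j hj
      exact h (j + 1) (by simpa using Nat.succ_lt_succ hj)
    rw [List.countP_cons, List.length_cons, List.range_succ_eq_map, List.countP_cons,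
        List.countP_map, ih _ hsh]
    simp [h0, Function.comp_def]

-- zeta-expanded form of port A
theorem countGoodNodes_eq (n : Int) (m : Int) (redEdges : List (List Int))
    (whiteEdges : List (List Int)) :
    countGoodNodes n m redEdges whiteEdges =
      ((pvCnt (pvG2 n redEdges whiteEdges)).zip (pvG2 n redEdges whiteEdges)).foldl
        (fun s p => s + (if p.1 = (p.2.size : Int) then 1 else 0)) 0 := rfl

-- zeta-expanded form of port B
theorem countGoodNodes_alt_eq (n : Int) (m : Int) (redEdges : List (List Int))
    (whiteEdges : List (List Int)) :
    countGoodNodes_alt n m redEdges whiteEdges =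
      (whiteEdges.foldl pvBStep (List.replicate n.toNat true)).foldl
        (fun s b => s + (if b then 1 else 0)) 0 := rfl

theorem pvBStep_length (g : List Bool) (e : List Int) : (pvBStep g e).length = g.length := by
  unfold pvBStep
  match e with
  | [] => rfl
  | [_] => rfl
  | [u, v] => simp [PySem.List.length_pySetD]
  | _ :: _ :: _ :: _ => rfl

theorem foldl_pvBStep_length (es : List (List Int)) (g : List Bool) :
    (es.foldl pvBStep g).length = g.length := by
  induction es generalizing g with
  | nil => rfl
  | cons e es ih => simp [List.foldl_cons, ih, pvBStep_length]

theorem pvBStep_eq (g : List Bool) (u v : Int)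
    (hu1 : -(g.length : Int) ≤ u) (hu2 : u < (g.length : Int))
    (hv1 : -(g.length : Int) ≤ v) (hv2 : v < (g.length : Int)) :
    pvBStep g [u, v]
      = (g.set (pvWrapIdx g.length u) false).set (pvWrapIdx g.length v) false := by
  show PySem.List.pySetD (PySem.List.pySetD g u false) v false = _
  rw [pySetD_inrange g u false hu1 hu2,
      pySetD_inrange _ v false (by rw [List.length_set]; exact hv1)
        (by rw [List.length_set]; exact hv2)]
  simp only [List.length_set]

theorem pvBfold_false (es : List (List Int)) (g : List Bool)
    (hes : ∀ e ∈ es, e.length = 2 ∧ ∀ x ∈ e, -(g.length : Int) ≤ x ∧ x < (g.length : Int))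
    (j : Nat) (hj : j < g.length) :
    ((es.foldl pvBStep g).getD j true = false) ↔
      (g.getD j true = false ∨ pvTouchedIdx es g.length j) := by
  induction es generalizing g with
  | nil => simp [pvTouchedIdx]
  | cons e es ih =>
    obtain ⟨he2, hebound⟩ := hes e (by simp)
    match e, he2 with
    | [u, v], _ =>
      have hu := hebound u (by simp)
      have hv := hebound v (by simp)
      have hlen : (pvBStep g [u, v]).length = g.length := pvBStep_length _ _
      have hstep : (pvBStep g [u, v]).getD j true = false ↔
          (g.getD j true = false ∨ j = pvWrapIdx g.length u ∨ j = pvWrapIdx g.length v) := by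
        rw [pvBStep_eq g u v hu.1 hu.2 hv.1 hv.2]
        by_cases hjv : j = pvWrapIdx g.length v
        · subst hjv
          rw [List.getD_eq_getElem _ _ (by simpa using hj), List.getElem_set_self]
          simp
        · rw [List.getD_eq_getElem _ _ (by simpa using hj),
              List.getElem_set_ne (fun h => hjv h.symm) (by simpa using hj)]
          by_cases hju : j = pvWrapIdx g.length u
          · subst hju
            rw [List.getElem_set_self]
            simp
          · rw [List.getElem_set_ne (fun h => hju h.symm) (by simpa using hj),
                ← List.getD_eq_getElem _ _ hj]
            constructor
            · exact Or.inl
            · rintro (h | h | h)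
              · exact h
              · exact absurd h hju
              · exact absurd h hjv
      rw [List.foldl_cons,
          ih (pvBStep g [u, v])
            (fun e' he' => by rw [hlen]; exact hes e' (List.mem_cons_of_mem _ he'))
            (by rw [hlen]; exact hj),
          hlen, hstep]
      unfold pvTouchedIdx
      constructor
      · rintro ((h | h | h) | ⟨e', he', x, hx, hw⟩)
        · exact Or.inl h
        · exact Or.inr ⟨[u, v], by simp, u, by simp, h.symm⟩
        · exact Or.inr ⟨[u, v], by simp, v, by simp, h.symm⟩
        · exact Or.inr ⟨e', List.mem_cons_of_mem _ he', x, hx, hw⟩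
      · rintro (h | ⟨e', he', x, hx, hw⟩)
        · exact Or.inl (Or.inl h)
        · rcases List.mem_cons.mp he' with rfl | he''
          · rcases List.mem_cons.mp hx with rfl | hx'
            · exact Or.inl (Or.inr (Or.inl hw.symm))
            · simp only [List.mem_cons, List.not_mem_nil, or_false] at hx'
              subst hx'
              exact Or.inl (Or.inr (Or.inr hw.symm))
          · exact Or.inr ⟨e', he'', x, hx, hw⟩

theorem sumBool_eq_countP (l : List Bool) :
    l.foldl (fun s b => s + (if b then 1 else 0)) 0 = (l.countP (fun b => b) : Int) := by
  rw [PySem.List.foldl_add, zero_add]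
  have := PySem.List.sum_map_ite_one_zero (fun b => b) l
  simpa using this

-- ===== VERDICT (by name: the statement is the Claim_ definition above) =====
theorem countGoodNodes_spec : Claim_equal_countGoodNodes := by
  intro n m red white _ hpre
  obtain ⟨hred, hwhite⟩ := hpre
  unfold Spec_countGoodNodes
  rw [countGoodNodes_eq, countGoodNodes_alt_eq]
  have hg2len : (pvG2 n red white).length = n.toNat := by
    unfold pvG2
    rw [foldl_pvStep_length, foldl_pvStep_length, List.length_map,
        PySem.List.length_pyRange_one]
    omega
  -- all values of g2 are 0 or 1
  have hval01 : ∀ d ∈ pvG2 n red white, ∀ v x, d.get? v = some x → x = 0 ∨ x = 1 := by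
    unfold pvG2
    refine foldl_pvStep_values 0 white _ ?_ (Or.inl rfl)
    have h1 : ∀ d ∈ (red.foldl (pvStep 1)
        ((PySem.List.pyRange 0 n 1).map (fun _ => (PySem.Dict.empty : PySem.Dict Int Int)))),
        ∀ v x, d.get? v = some x → x = 1 := by
      refine foldl_pvStep_values 1 red _ ?_ rfl
      intro d hd v x h
      rcases List.mem_map.mp hd with ⟨_, _, rfl⟩
      rw [PySem.Dict.get?_empty] at h
      simp at h
    exact fun d hd v x h => Or.inr (h1 d hd v x h)
  -- pvHas0 of g2 is exactly "touched by a white edge after wraparound"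
  have hhas0 : ∀ j : Nat, j < (pvG2 n red white).length →
      (pvHas0 (pvG2 n red white) j ↔ pvTouchedIdx white n.toNat j) := by
    intro j hj
    have hredlen : (red.foldl (pvStep 1)
        ((PySem.List.pyRange 0 n 1).map
          (fun _ => (PySem.Dict.empty : PySem.Dict Int Int)))).length = n.toNat := by
      rw [foldl_pvStep_length, List.length_map, PySem.List.length_pyRange_one]
      omega
    unfold pvG2 at hj ⊢
    rw [pvHas0_fold white (red.foldl (pvStep 1)
        ((PySem.List.pyRange 0 n 1).map (fun _ => (PySem.Dict.empty : PySem.Dict Int Int))))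
        (fun e he => by
          obtain ⟨h2, hb⟩ := hwhite e he
          refine ⟨h2, fun x hx => ?_⟩
          have := hb x hx
          rw [hredlen]
          omega)
        j (by rwa [foldl_pvStep_length] at hj),
      hredlen]
    have hno : ¬ pvHas0 (red.foldl (pvStep 1)
        ((PySem.List.pyRange 0 n 1).map (fun _ => (PySem.Dict.empty : PySem.Dict Int Int)))) j := by
      rintro ⟨w, hw⟩
      by_cases hjl : j < (red.foldl (pvStep 1)
          ((PySem.List.pyRange 0 n 1).map (fun _ => (PySem.Dict.empty : PySem.Dict Int Int)))).length
      · have h1 : ∀ d ∈ (red.foldl (pvStep 1)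
            ((PySem.List.pyRange 0 n 1).map (fun _ => (PySem.Dict.empty : PySem.Dict Int Int)))),
            ∀ v x, d.get? v = some x → x = 1 := by
          refine foldl_pvStep_values 1 red _ ?_ rfl
          intro d hd v x h
          rcases List.mem_map.mp hd with ⟨_, _, rfl⟩
          rw [PySem.Dict.get?_empty] at h
          simp at h
        rw [List.getD_eq_getElem _ _ hjl] at hw
        have := h1 _ (List.getElem_mem hjl) w 0 hw
        omega
      · rw [List.getD_eq_default _ _ (by omega)] at hw
        rw [PySem.Dict.get?_empty] at hw
        simp at hw
    tauto
    -- per-index goodness of A equals "not touched"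
  have hgood : ∀ j (hj : j < (pvG2 n red white).length),
      (decide ((((pvG2 n red white)[j].keys.map
          (fun v => (pvG2 n red white)[j].getD v 0)).sum = ((pvG2 n red white)[j].size : Int)))
        = !(pvTouchedIdxB white n.toNat j)) := by
    intro j hj
    have hD01 : ∀ v ∈ (pvG2 n red white)[j].keys,
        (pvG2 n red white)[j].getD v 0 = 0 ∨ (pvG2 n red white)[j].getD v 0 = 1 := by
      intro v hv
      rcases hk : (pvG2 n red white)[j].get? v with _ | x
      · rw [PySem.Dict.get?_eq_none_iff_not_mem_keys] at hk; exact absurd hv hk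
      · rw [pvGetD_eq, hk]
        exact hval01 _ (List.getElem_mem hj) v x hk
    have hsize : (((pvG2 n red white)[j].size : Nat) : Int)
        = (((pvG2 n red white)[j].keys.length : Nat) : Int) := by
      simp [PySem.Dict.size, PySem.Dict.keys]
    have hiff : (∀ v ∈ (pvG2 n red white)[j].keys, (pvG2 n red white)[j].getD v 0 = 1)
        ↔ ¬ pvTouchedIdx white n.toNat j := by
      rw [← hhas0 j hj]
      unfold pvHas0
      rw [List.getD_eq_getElem _ _ hj]
      constructor
      · rintro hall ⟨w, hw⟩
        have hwk : w ∈ (pvG2 n red white)[j].keys := by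
          by_contra hnk
          rw [← PySem.Dict.get?_eq_none_iff_not_mem_keys] at hnk
          rw [hnk] at hw
          simp at hw
        have hone := hall w hwk
        rw [pvGetD_eq, hw] at hone
        simp at hone
      · intro hno v hv
        rcases hk : (pvG2 n red white)[j].get? v with _ | x
        · rw [PySem.Dict.get?_eq_none_iff_not_mem_keys] at hk; exact absurd hv hk
        · rcases hval01 _ (List.getElem_mem hj) v x hk with h0 | h1
          · exact absurd ⟨v, by rw [hk, h0]⟩ hno
          · rw [pvGetD_eq, hk, h1]; rfl
    cases hb : pvTouchedIdxB white n.toNat j with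
    | false =>
      have hnt : ¬ pvTouchedIdx white n.toNat j := fun ht => by
        have := (pvTouchedIdxB_iff white n.toNat j).mpr ht
        rw [hb] at this
        simp at this
      have hcond : (((pvG2 n red white)[j].keys.map
          (fun v => (pvG2 n red white)[j].getD v 0)).sum = ((pvG2 n red white)[j].size : Int)) := by
        rw [hsize]
        exact (sum01_eq_length_iff _ _ hD01).mpr (hiff.mpr hnt)
      simp [hcond]
    | true =>
      have ht : pvTouchedIdx white n.toNat j := (pvTouchedIdxB_iff white n.toNat j).mp hb
      have hcond : ¬ (((pvG2 n red white)[j].keys.map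
          (fun v => (pvG2 n red white)[j].getD v 0)).sum = ((pvG2 n red white)[j].size : Int)) := by
        rw [hsize, sum01_eq_length_iff _ _ hD01]
        exact fun hall => (hiff.mp hall) ht
      simp [hcond]
  -- turn A's fold into a countP over g2
  have hA : ((pvCnt (pvG2 n red white)).zip (pvG2 n red white)).foldl
        (fun s p => s + (if p.1 = (p.2.size : Int) then 1 else 0)) 0
      = ((pvG2 n red white).countP (fun d : PySem.Dict Int Int =>
          decide ((d.keys.map (fun v => d.getD v 0)).sum = (d.size : Int))) : Int) := by
    unfold pvCnt
    rw [zip_map_self, List.foldl_map, PySem.List.foldl_add, zero_add]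
    refine Eq.trans (congrArg List.sum (List.map_congr_left ?_))
      (PySem.List.sum_map_ite_one_zero _ _)
    intro d _
    have hfs : List.foldl (fun c v => c + d.getD v 0) 0 d.keys
        = (d.keys.map (fun v => d.getD v 0)).sum := by
      rw [PySem.List.foldl_add, zero_add]
    simp [hfs]
  rw [hA]
  -- turn B's boolean-array sum into the same countP over the index range
  rw [countP_index (pvG2 n red white) _ (fun j : Nat => !(pvTouchedIdxB white n.toNat j)) hgood,
      hg2len, sumBool_eq_countP]
  have hgoodlen : (white.foldl pvBStep (List.replicate n.toNat true)).length = n.toNat := by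
    rw [foldl_pvBStep_length, List.length_replicate]
  have hBidx : ∀ j (hj : j < (white.foldl pvBStep (List.replicate n.toNat true)).length),
      (fun b => b) ((white.foldl pvBStep (List.replicate n.toNat true))[j])
        = !(pvTouchedIdxB white n.toNat j) := by
    intro j hj
    have hj' : j < n.toNat := by rwa [hgoodlen] at hj
    have hrep : (List.replicate n.toNat true).length = n.toNat := List.length_replicate
    have hfold := pvBfold_false white (List.replicate n.toNat true)
      (fun e he => by
        obtain ⟨h2, hb⟩ := hwhite e he
        refine ⟨h2, fun x hx => ?_⟩
        have := hb x hx
        rw [hrep]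
        omega)
      j (by rw [hrep]; exact hj')
    rw [hrep] at hfold
    have hrepval : (List.replicate n.toNat true).getD j true = true := by
      rw [List.getD_eq_getElem _ _ (by rw [hrep]; exact hj'), List.getElem_replicate]
    rw [List.getD_eq_getElem _ _ hj] at hfold
    simp only [hrepval] at hfold
    cases hb : pvTouchedIdxB white n.toNat j with
    | false =>
      have hnt : ¬ pvTouchedIdx white n.toNat j := fun ht => by
        have := (pvTouchedIdxB_iff white n.toNat j).mpr ht
        rw [hb] at this
        simp at this
      have : ¬ ((white.foldl pvBStep (List.replicate n.toNat true))[j] = false) := by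
        rw [hfold]
        simp [hnt]
      simpa using this
    | true =>
      have ht : pvTouchedIdx white n.toNat j := (pvTouchedIdxB_iff white n.toNat j).mp hb
      have : (white.foldl pvBStep (List.replicate n.toNat true))[j] = false := by
        rw [hfold]
        exact Or.inr ht
      simpa using this
  rw [countP_index (white.foldl pvBStep (List.replicate n.toNat true)) _
        (fun j : Nat => !(pvTouchedIdxB white n.toNat j)) hBidx,
      hgoodlen]
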